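-- pv_equiv track=rewrite | github.com/leyredelacalzada/azure-search-openai-demo | foundry_agents/orchestrator/workflow.py | parse_routing_decision
-- ===== SOURCE A (Python) =====
-- def parse_routing_decision(response_text: str) -> str:
--     """
--     Parse the orchestrator's routing decision from its response.
--
--     Args:
--         response_text: The orchestrator's response text
--
--     Returns:
--         The agent ID to route to (defaults to benefits-agent if parsing fails)
--     """
--     response_lower = response_text.lower()
--
--     # Look for AGENT: pattern
--     if "agent:" in response_lower:
--         for line in response_text.split("\n"):
--             if "agent:" in line.lower():
--                 agent_part = line.split(":", 1)[1].strip().lower()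
--                 if "benefits" in agent_part:
--                     return "benefits-agent"
--                 elif "hr-policy" in agent_part or "policy" in agent_part:
--                     return "hr-policy-agent"
--                 elif "perks" in agent_part:
--                     return "perks-agent"
--
--     # Fallback: look for agent names anywhere in the response
--     if "benefits" in response_lower:
--         return "benefits-agent"
--     elif "hr-policy" in response_lower or "policy" in response_lower:
--         return "hr-policy-agent"
--     elif "perks" in response_lower:
--         return "perks-agent"
--
--     # Default to benefits agent
--     return "benefits-agent"
-- ===== SOURCE B (Python) =====
-- _TABLE = [("benefits", "benefits-agent"),
--           ("policy", "hr-policy-agent"),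
--           ("perks", "perks-agent")]
--
--
-- def parse_routing_decision(response_text: str) -> str:
--     low = response_text.lower()
--     texts = []
--     if "agent:" in low:
--         texts = [line.split(":", 1)[1].strip().lower()
--                  for line in response_text.split("\n")
--                  if "agent:" in line.lower()]
--     texts.append(low)
--     hits = [(i, j)
--             for i, text in enumerate(texts)
--             for j, (kw, _) in enumerate(_TABLE)
--             if kw in text]
--     if not hits:
--         return "benefits-agent"
--     return _TABLE[min(hits)[1]][1]
-- ===== Notes on version B (the rewrite author's own statement) =====
-- stated objective: alternative
-- what changed: Instead of A's two duplicated early-return if/elif scans, B builds the ordered candidate-text list (agent-line parts then the whole lowercased text), enumerates ALL (text index, keyword index) matches against a 3-entry keyword table as a list of index pairs, and selects the answer as the lexicographically minimal hit via min(), defaulting to benefits-agent when no hit exists.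
import Mathlib
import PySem

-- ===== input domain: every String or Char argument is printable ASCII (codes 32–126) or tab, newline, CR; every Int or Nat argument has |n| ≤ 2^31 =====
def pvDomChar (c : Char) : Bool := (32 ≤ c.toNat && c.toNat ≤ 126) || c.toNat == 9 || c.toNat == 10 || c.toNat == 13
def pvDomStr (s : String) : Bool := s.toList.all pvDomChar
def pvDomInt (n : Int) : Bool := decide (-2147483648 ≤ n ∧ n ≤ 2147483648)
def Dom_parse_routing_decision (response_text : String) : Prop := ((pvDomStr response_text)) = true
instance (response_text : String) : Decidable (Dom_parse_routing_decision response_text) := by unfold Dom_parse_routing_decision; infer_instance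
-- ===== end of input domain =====

-- B replaces A's two early-return if/elif scans by an enumerate-everything strategy:
-- it builds the ordered candidate-text list, collects ALL (text index, keyword index)
-- matches against a keyword table, and answers with the lexicographically minimal hit
-- (objective: alternative — same cost, a genuinely different selection mechanism).

-- ===== PORT A =====
-- the text after the first ':' of a line: line.split(":", 1)[1].strip().lower()
-- (index 1 is ported with pyGetD "": it is always in range, since each line reaching it
-- contains "agent:" case-insensitively and hence contains ':')
def prdAgentPart (line : String) : String :=
  PySem.Str.lower (PySem.Str.strip
    (PySem.List.pyGetD ((PySem.Str.splitMax? line ":" 1).getD []) 1 ""))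

-- the for-loop over response_text.split("\n"): matching a keyword returns, otherwise
-- the loop continues with the remaining lines
def prdLoopA : List String → Option String
  | [] => none
  | line :: rest =>
    if PySem.Str.isIn "agent:" (PySem.Str.lower line) then
      let agent_part := prdAgentPart line
      if PySem.Str.isIn "benefits" agent_part then some "benefits-agent"
      else if PySem.Str.isIn "hr-policy" agent_part || PySem.Str.isIn "policy" agent_part then
        some "hr-policy-agent"
      else if PySem.Str.isIn "perks" agent_part then some "perks-agent"
      else prdLoopA rest
    else prdLoopA rest

def parse_routing_decision (response_text : String) : String :=
  let response_lower := PySem.Str.lower response_text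
  (if PySem.Str.isIn "agent:" response_lower then
      prdLoopA ((PySem.Str.split? response_text "\n").getD [])
    else none).getD
    (if PySem.Str.isIn "benefits" response_lower then "benefits-agent"
     else if PySem.Str.isIn "hr-policy" response_lower || PySem.Str.isIn "policy" response_lower then
       "hr-policy-agent"
     else if PySem.Str.isIn "perks" response_lower then "perks-agent"
     else "benefits-agent")

-- ===== PORT B =====
def prdTable : List (String × String) :=
  [("benefits", "benefits-agent"), ("policy", "hr-policy-agent"), ("perks", "perks-agent")]

-- hits = [(i, j) for i, text in enumerate(texts) for j, (kw, _) in enumerate(_TABLE) if kw in text]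
-- if not hits: return "benefits-agent"; else return _TABLE[min(hits)[1]][1]
-- (_TABLE[...] is ported with pyGetD: min(hits)[1] is always a table index, hence in range;
--  min(hits) itself is guarded by the emptiness test, so the .getD default is never used)
def parse_routing_decision_alt (response_text : String) : String :=
  let low := PySem.Str.lower response_text
  let texts :=
    (if PySem.Str.isIn "agent:" low then
       (((PySem.Str.split? response_text "\n").getD []).filter
          (fun line => PySem.Str.isIn "agent:" (PySem.Str.lower line))).map
         (fun line => PySem.Str.lower (PySem.Str.strip
            (PySem.List.pyGetD ((PySem.Str.splitMax? line ":" 1).getD []) 1 "")))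
     else []) ++ [low]
  let hits := (PySem.List.enumerate texts 0).flatMap (fun it =>
    ((PySem.List.enumerate prdTable 0).filter (fun jk => PySem.Str.isIn jk.2.1 it.2)).map
      (fun jk => (it.1, jk.1)))
  if hits = [] then "benefits-agent"
  else (PySem.List.pyGetD prdTable
          (((PySem.List.min2? hits Prod.fst Prod.snd).getD (0, 0)).2) ("", "")).2

-- ===== PRECONDITION & SPEC =====
def Spec_parse_routing_decision (response_text : String) (out : String) : Prop := out = parse_routing_decision_alt response_text
instance (response_text : String) (out : String) : Decidable (Spec_parse_routing_decision response_text out) := by unfold Spec_parse_routing_decision; infer_instance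

-- ===== CLAIM (what is proved, stated in full; the proofs are below) =====
def Claim_equal_parse_routing_decision : Prop := ∀ (response_text : String), Dom_parse_routing_decision response_text → Spec_parse_routing_decision response_text (parse_routing_decision response_text)

-- ===== LEMMAS AND PROOFS =====

-- sequential "first keyword hit per text" reference semantics both ports are reduced to
def prdSeqO : List String → Option String
  | [] => none
  | t :: rest =>
    if PySem.Str.isIn "benefits" t then some "benefits-agent"
    else if PySem.Str.isIn "policy" t then some "hr-policy-agent"
    else if PySem.Str.isIn "perks" t then some "perks-agent"
    else prdSeqO rest

-- B's hit list, generalized over the starting enumeration index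
def prdHitsFrom (i0 : Int) (texts : List String) : List (Int × Int) :=
  (PySem.List.enumerate texts i0).flatMap (fun it =>
    ((PySem.List.enumerate prdTable 0).filter (fun jk => PySem.Str.isIn jk.2.1 it.2)).map
      (fun jk => (it.1, jk.1)))

-- "policy" is a suffix of "hr-policy", so any text containing "hr-policy" contains "policy"
theorem prd_policy_of_hr (x : String) :
    PySem.Str.isIn "hr-policy" x = true → PySem.Str.isIn "policy" x = true := by
  simp only [PySem.Str.isIn_iff_infix]
  intro h
  exact List.IsInfix.trans (by decide : "policy".toList <:+: "hr-policy".toList) h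

-- A's redundant "hr-policy" test collapses (h implies p)
theorem prd_chain_collapse {α : Type} (b h p k : Bool) (X Y Z c : α)
    (himp : h = true → p = true) :
    (if b then X else if h || p then Y else if k then Z else c)
      = (if b then X else if p then Y else if k then Z else c) := by
  cases b <;> cases h <;> cases p <;> cases k <;> simp_all

theorem prd_loopA_eq_seqO (lines : List String) :
    prdLoopA lines
      = prdSeqO ((lines.filter
          (fun l => PySem.Str.isIn "agent:" (PySem.Str.lower l))).map prdAgentPart) := by
  induction lines with
  | nil => rfl
  | cons line rest ih =>
    by_cases hl : PySem.Str.isIn "agent:" (PySem.Str.lower line) = true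
    · simp only [prdLoopA, List.filter_cons, hl, if_pos, List.map_cons, prdSeqO]
      rw [prd_chain_collapse _ _ _ _ _ _ _ _ (prd_policy_of_hr _), ih]
    · simp only [prdLoopA, List.filter_cons, hl, Bool.false_eq_true, ite_false]
      exact ih

theorem prd_seqO_append (xs ys : List String) :
    prdSeqO (xs ++ ys) = (prdSeqO xs).or (prdSeqO ys) := by
  induction xs with
  | nil => rfl
  | cons t rest ih =>
    simp only [List.cons_append, prdSeqO, ih]
    split_ifs <;> rfl

theorem prd_or_getD {α : Type} (a b : Option α) (d : α) :
    (a.or b).getD d = a.getD (b.getD d) := by cases a <;> rfl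

-- the enumerated table, evaluated
theorem prd_enum_table :
    PySem.List.enumerate prdTable 0
      = [(0, ("benefits", "benefits-agent")), (1, ("policy", "hr-policy-agent")),
         (2, ("perks", "perks-agent"))] := by decide

theorem prd_hitsFrom_nil (i0 : Int) : prdHitsFrom i0 [] = [] := by
  simp [prdHitsFrom, PySem.List.enumerate]

theorem prd_hitsFrom_cons (i0 : Int) (t : String) (rest : List String) :
    prdHitsFrom i0 (t :: rest)
      = ((if PySem.Str.isIn "benefits" t then [(i0, (0 : Int))] else [])
          ++ (if PySem.Str.isIn "policy" t then [(i0, (1 : Int))] else [])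
          ++ (if PySem.Str.isIn "perks" t then [(i0, (2 : Int))] else []))
        ++ prdHitsFrom (i0 + 1) rest := by
  cases hb : PySem.Str.isIn "benefits" t <;> cases hp : PySem.Str.isIn "policy" t <;>
    cases hk : PySem.Str.isIn "perks" t <;>
    simp only [prdHitsFrom, PySem.List.enumerate_cons, List.flatMap_cons, prd_enum_table,
      List.filter_cons, List.filter_nil, List.map_cons, List.map_nil, hb, hp, hk,
      Bool.false_eq_true, ite_true, ite_false, List.nil_append, List.append_nil,
      List.cons_append]

theorem prd_hitsFrom_fst_le (i0 : Int) (texts : List String) :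
    ∀ p ∈ prdHitsFrom i0 texts, i0 ≤ p.1 := by
  induction texts generalizing i0 with
  | nil => simp [prd_hitsFrom_nil]
  | cons t rest ih =>
    intro p hp
    rw [prd_hitsFrom_cons] at hp
    rcases List.mem_append.1 hp with h | h
    · rcases List.mem_append.1 h with h' | h'
      · rcases List.mem_append.1 h' with h'' | h'' <;>
          · split_ifs at h'' <;> simp_all
      · split_ifs at h' <;> simp_all
    · have := ih (i0 + 1) p h
      omega

-- the foldl inside min2? keeps an accumulator the rest never improves on
theorem prd_foldl_keep {α β : Type} (f : Option α → β → Option α) (h : α) (t : List β)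
    (hf : ∀ x ∈ t, f (some h) x = some h) : t.foldl f (some h) = some h := by
  induction t with
  | nil => rfl
  | cons x rest ih =>
    rw [List.foldl_cons, hf x (List.mem_cons_self ..)]
    exact ih (fun y hy => hf y (List.mem_cons_of_mem _ hy))

theorem prd_min2_cons (h : Int × Int) (t : List (Int × Int))
    (hlt : ∀ x ∈ t, h.1 < x.1 ∨ (h.1 = x.1 ∧ h.2 < x.2)) :
    PySem.List.min2? (h :: t) Prod.fst Prod.snd = some h := by
  simp only [PySem.List.min2?, List.foldl_cons]
  refine prd_foldl_keep _ h t ?_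
  intro x hx
  beta_reduce
  split
  · rename_i heq
    simp at heq
  · rename_i m heq
    obtain rfl : h = m := by injection heq
    split
    · rename_i hc
      rcases hlt x hx with h1 | ⟨h1, h2⟩ <;> simp_all <;> omega
    · rfl

-- B's tail computation on the hit list equals the sequential reference semantics
theorem prd_B_eq_seq (texts : List String) (i0 : Int) :
    (if prdHitsFrom i0 texts = [] then "benefits-agent"
     else (PySem.List.pyGetD prdTable
             (((PySem.List.min2? (prdHitsFrom i0 texts) Prod.fst Prod.snd).getD (0, 0)).2)
             ("", "")).2)
      = (prdSeqO texts).getD "benefits-agent" := by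
  induction texts generalizing i0 with
  | nil => simp [prd_hitsFrom_nil, prdSeqO]
  | cons t rest ih =>
    rw [prd_hitsFrom_cons]
    have hrest : ∀ x ∈ prdHitsFrom (i0 + 1) rest, i0 < x.1 := by
      intro x hx
      have := prd_hitsFrom_fst_le (i0 + 1) rest x hx
      omega
    cases hb : PySem.Str.isIn "benefits" t <;> cases hp : PySem.Str.isIn "policy" t <;>
      cases hk : PySem.Str.isIn "perks" t <;>
      simp only [hb, hp, hk, Bool.false_eq_true, ite_true, ite_false, List.nil_append,
        List.append_nil, List.cons_append, prdSeqO, Option.getD_some]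
    -- F F F: no hit on t, recurse
    · exact ih (i0 + 1)
    -- F F T: head (i0, 2)
    · rw [if_neg (List.cons_ne_nil _ _),
        prd_min2_cons _ _ (fun x hx => Or.inl (hrest x hx))]
      rfl
    -- F T F: head (i0, 1)
    · rw [if_neg (List.cons_ne_nil _ _),
        prd_min2_cons _ _ (fun x hx => Or.inl (hrest x hx))]
      rfl
    -- F T T: head (i0, 1), then (i0, 2)
    · rw [if_neg (List.cons_ne_nil _ _), prd_min2_cons _ _ ?_]
      · rfl
      · intro x hx
        rcases List.mem_cons.1 hx with rfl | hx
        · exact Or.inr ⟨rfl, by norm_num⟩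
        · exact Or.inl (hrest x hx)
    -- T F F: head (i0, 0)
    · rw [if_neg (List.cons_ne_nil _ _),
        prd_min2_cons _ _ (fun x hx => Or.inl (hrest x hx))]
      rfl
    -- T F T: head (i0, 0), then (i0, 2)
    · rw [if_neg (List.cons_ne_nil _ _), prd_min2_cons _ _ ?_]
      · rfl
      · intro x hx
        rcases List.mem_cons.1 hx with rfl | hx
        · exact Or.inr ⟨rfl, by norm_num⟩
        · exact Or.inl (hrest x hx)
    -- T T F: head (i0, 0), then (i0, 1)
    · rw [if_neg (List.cons_ne_nil _ _), prd_min2_cons _ _ ?_]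
      · rfl
      · intro x hx
        rcases List.mem_cons.1 hx with rfl | hx
        · exact Or.inr ⟨rfl, by norm_num⟩
        · exact Or.inl (hrest x hx)
    -- T T T: head (i0, 0), then (i0, 1), (i0, 2)
    · rw [if_neg (List.cons_ne_nil _ _), prd_min2_cons _ _ ?_]
      · rfl
      · intro x hx
        rcases List.mem_cons.1 hx with rfl | hx
        · exact Or.inr ⟨rfl, by norm_num⟩
        rcases List.mem_cons.1 hx with rfl | hx
        · exact Or.inr ⟨rfl, by norm_num⟩
        · exact Or.inl (hrest x hx)

-- ===== VERDICT (by name: the statement is the Claim_ definition above) =====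
theorem parse_routing_decision_spec : Claim_equal_parse_routing_decision := by
  intro response_text _
  unfold Spec_parse_routing_decision parse_routing_decision parse_routing_decision_alt
  have hhits :
      ∀ texts : List String,
        (PySem.List.enumerate texts 0).flatMap (fun it =>
          ((PySem.List.enumerate prdTable 0).filter (fun jk => PySem.Str.isIn jk.2.1 it.2)).map
            (fun jk => (it.1, jk.1))) = prdHitsFrom 0 texts := fun _ => rfl
  simp only [hhits, prd_B_eq_seq]
  by_cases ha : PySem.Str.isIn "agent:" (PySem.Str.lower response_text) = true
  · simp only [ha, ite_true, prd_loopA_eq_seqO, prd_seqO_append, prd_or_getD]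
    congr 1
    have : prdSeqO [PySem.Str.lower response_text]
        = (if PySem.Str.isIn "benefits" (PySem.Str.lower response_text) then some "benefits-agent"
           else if PySem.Str.isIn "policy" (PySem.Str.lower response_text) then some "hr-policy-agent"
           else if PySem.Str.isIn "perks" (PySem.Str.lower response_text) then some "perks-agent"
           else none) := by simp [prdSeqO]
    rw [this, ← prd_chain_collapse _ (PySem.Str.isIn "hr-policy" (PySem.Str.lower response_text)) _ _
      (some "benefits-agent") (some "hr-policy-agent") (some "perks-agent") none
      (prd_policy_of_hr _)]
    split_ifs <;> rfl
  · simp only [ha, Bool.false_eq_true, ite_false, List.nil_append, Option.getD_none]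
    have : prdSeqO [PySem.Str.lower response_text]
        = (if PySem.Str.isIn "benefits" (PySem.Str.lower response_text) then some "benefits-agent"
           else if PySem.Str.isIn "policy" (PySem.Str.lower response_text) then some "hr-policy-agent"
           else if PySem.Str.isIn "perks" (PySem.Str.lower response_text) then some "perks-agent"
           else none) := by simp [prdSeqO]
    rw [this, ← prd_chain_collapse _ (PySem.Str.isIn "hr-policy" (PySem.Str.lower response_text)) _ _
      (some "benefits-agent") (some "hr-policy-agent") (some "perks-agent") none
      (prd_policy_of_hr _)]
    split_ifs <;> rfl
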